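-- pv_equiv track=rewrite | github.com/mattikantola/tira2_python | Viikko9/biterase.py | count
-- ===== SOURCE A (Python) =====
-- def count(s):
--
--     cache = {}
--
--     def seek_and_destroy(bitstring):
--
--         if len(bitstring) == 0:
--
--             return 1
--
--         else:
--
--             partitions = 0
--
--             for iii in range(len(bitstring)-1):
--
--                 if bitstring[iii] == bitstring[iii+1]:
--
--                     new_bitstring = bitstring[:iii] + bitstring[iii+2:]
--
--                     if new_bitstring not in cache:
--
--                         cache[new_bitstring] = seek_and_destroy(new_bitstring)
--
--                     partitions += cache[new_bitstring]
--
--             return partitions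
--
--     return seek_and_destroy(s)
-- ===== SOURCE B (Python) =====
-- def count(s):
--     # Forward level-by-level path counting: cur maps each string reachable
--     # after k deletions to the number of ordered deletion sequences reaching it.
--     cur = {s: 1}
--     for _ in range(len(s) // 2):
--         nxt = {}
--         for t, c in cur.items():
--             for i in range(len(t) - 1):
--                 if t[i] == t[i + 1]:
--                     u = t[:i] + t[i + 2:]
--                     nxt[u] = nxt.get(u, 0) + c
--         cur = nxt
--     return cur.get("", 0)
-- ===== Notes on version B (the rewrite author's own statement) =====
-- stated objective: alternative
-- what changed: Replaces A's backward memoized recursion (ways-to-empty per string, cached) by a forward breadth-first level DP: a dict of path counts from the source string is pushed through len(s)//2 deletion rounds and the count at the empty string is read off.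
import Mathlib
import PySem

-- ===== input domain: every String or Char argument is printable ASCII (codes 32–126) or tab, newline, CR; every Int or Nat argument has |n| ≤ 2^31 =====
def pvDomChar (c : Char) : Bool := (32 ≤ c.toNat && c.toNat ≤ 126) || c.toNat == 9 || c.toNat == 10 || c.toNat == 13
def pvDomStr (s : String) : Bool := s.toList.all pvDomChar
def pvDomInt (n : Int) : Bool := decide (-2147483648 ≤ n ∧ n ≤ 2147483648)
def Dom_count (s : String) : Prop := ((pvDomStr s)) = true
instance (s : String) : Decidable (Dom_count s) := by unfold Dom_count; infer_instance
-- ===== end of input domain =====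

-- B replaces A's backward memoized recursion by a forward level-by-level path-count DP
-- (alternative decomposition, similar cost); equivalence of return values is proved below.

-- ===== PORT A =====
-- A's nested recursion `seek_and_destroy` with its mutable cache, threaded as a Dict;
-- fuel = length + 1 (each recursive call shortens the string by 2, so fuel never runs out).
def sadGo : Nat → List Char → PySem.Dict (List Char) Int → Int × PySem.Dict (List Char) Int
  | 0, _, cache => (0, cache)
  | fuel+1, bs, cache =>
    if bs.length = 0 then (1, cache)
    else
      (List.range (bs.length - 1)).foldl
        (fun st (iii : Nat) =>
          if PySem.List.pyGet? bs (iii : Int) = PySem.List.pyGet? bs ((iii : Int) + 1) then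
            let nb := PySem.List.slice bs none (some (iii : Int)) ++
                      PySem.List.slice bs (some ((iii : Int) + 2)) none
            let c2 := if st.2.contains nb then st.2
                      else (let r := sadGo fuel nb st.2; r.2.insert nb r.1)
            (st.1 + c2.getD nb 0, c2)
          else st)
        (0, cache)

def count (s : String) : Int := (sadGo (s.toList.length + 1) s.toList PySem.Dict.empty).1

-- ===== PORT B =====
-- one round of B's forward DP: push every path count one deletion further
def stepB (cur : PySem.Dict (List Char) Int) : PySem.Dict (List Char) Int :=
  cur.items.foldl
    (fun nxt tc =>
      (List.range (tc.1.length - 1)).foldl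
        (fun nxt (i : Nat) =>
          if PySem.List.pyGet? tc.1 (i : Int) = PySem.List.pyGet? tc.1 ((i : Int) + 1) then
            let u := PySem.List.slice tc.1 none (some (i : Int)) ++
                     PySem.List.slice tc.1 (some ((i : Int) + 2)) none
            nxt.insert u (nxt.getD u 0 + tc.2)
          else nxt)
        nxt)
    PySem.Dict.empty

def count_alt (s : String) : Int :=
  ((List.range (s.toList.length / 2)).foldl (fun cur _ => stepB cur)
    (PySem.Dict.empty.insert s.toList 1)).getD [] 0

-- ===== PRECONDITION & SPEC =====
def Spec_count (s : String) (out : Int) : Prop := out = count_alt s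
instance (s : String) (out : Int) : Decidable (Spec_count s out) := by unfold Spec_count; infer_instance

-- ===== CLAIM (what is proved, stated in full; the proofs are below) =====
def Claim_equal_count : Prop := ∀ (s : String), Dom_count s → Spec_count s (count s)

-- ===== LEMMAS AND PROOFS =====

-- the string after deleting the equal pair at positions i, i+1
def delC (l : List Char) (i : Nat) : List Char := l.take i ++ l.drop (i + 2)

lemma length_delC (l : List Char) (i : Nat) (h : i < l.length - 1) :
    (delC l i).length = l.length - 2 := by
  simp [delC]; omega

-- the common mathematical value: number of ordered deletion sequences erasing l
def pureC (l : List Char) : Int :=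
  if _h : l.length = 0 then 1
  else ((List.range (l.length - 1)).attach.map
        (fun x => if l[x.1]? = l[x.1+1]? then pureC (delC l x.1) else 0)).sum
termination_by l.length
decreasing_by
  have hx := List.mem_range.mp x.2
  have := length_delC l x.1 hx
  omega

lemma pureC_nil : pureC ([] : List Char) = 1 := by simp [pureC]

lemma pureC_eq (l : List Char) (h : l ≠ []) :
    pureC l = ((List.range (l.length - 1)).map
      (fun i => if l[i]? = l[i+1]? then pureC (delC l i) else 0)).sum := by
  rw [pureC, dif_neg (by simpa using h)]
  simp only [List.map_subtype, List.unattach_attach]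

lemma pureC_len_one (l : List Char) (h : l.length = 1) : pureC l = 0 := by
  rw [pureC_eq l (by intro hn; simp [hn] at h), h]
  simp

-- cast bookkeeping: the port's pyGet?/slice expressions are getElem?/take/drop
lemma cond_cast (l : List Char) (i : Nat) :
    (PySem.List.pyGet? l (i : Int) = PySem.List.pyGet? l ((i : Int) + 1)) =
      (l[i]? = l[i+1]?) := by
  have h1 : ((i : Int) + 1) = ((i + 1 : Nat) : Int) := by push_cast; ring
  rw [h1, PySem.List.pyGet?_natCast, PySem.List.pyGet?_natCast]

lemma slice_cast (l : List Char) (i : Nat) :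
    PySem.List.slice l none (some (i : Int)) ++
      PySem.List.slice l (some ((i : Int) + 2)) none = delC l i := by
  have h2 : ((i : Int) + 2) = ((i + 2 : Nat) : Int) := by push_cast; ring
  rw [h2, PySem.List.slice_to_natCast, PySem.List.slice_from_natCast, delC]

-- ---------- A's side: the threaded cache is always correct ----------
def CacheOK (c : PySem.Dict (List Char) Int) : Prop :=
  ∀ k v, c.get? k = some v → v = pureC k

-- the fold body of sadGo (fuel+1), named for the proofs (definitionally the port's lambda)
def sadStep (fuel : Nat) (bs : List Char)
    (st : Int × PySem.Dict (List Char) Int) (iii : Nat) :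
    Int × PySem.Dict (List Char) Int :=
  if PySem.List.pyGet? bs (iii : Int) = PySem.List.pyGet? bs ((iii : Int) + 1) then
    let nb := PySem.List.slice bs none (some (iii : Int)) ++
              PySem.List.slice bs (some ((iii : Int) + 2)) none
    let c2 := if st.2.contains nb then st.2
              else (let r := sadGo fuel nb st.2; r.2.insert nb r.1)
    (st.1 + c2.getD nb 0, c2)
  else st

lemma sadGo_succ (fuel : Nat) (bs : List Char) (cache : PySem.Dict (List Char) Int)
    (h : ¬ bs.length = 0) :
    sadGo (fuel+1) bs cache =
      (List.range (bs.length - 1)).foldl (sadStep fuel bs) (0, cache) := by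
  rw [sadGo, if_neg h]; rfl

lemma foldA (fuel : Nat)
    (IH : ∀ bs c, bs.length < fuel → CacheOK c →
      (sadGo fuel bs c).1 = pureC bs ∧ CacheOK (sadGo fuel bs c).2)
    (bs : List Char) (hbs : bs.length ≤ fuel) :
    ∀ (is : List Nat), (∀ i ∈ is, i < bs.length - 1) → ∀ (p : Int) c, CacheOK c →
      (is.foldl (sadStep fuel bs) (p, c)).1 =
        p + (is.map (fun i => if bs[i]? = bs[i+1]? then pureC (delC bs i) else 0)).sum
      ∧ CacheOK (is.foldl (sadStep fuel bs) (p, c)).2 := by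
  intro is
  induction is with
  | nil => intro _ p c hc; simpa using hc
  | cons i is ih =>
    intro hmem p c hc
    have hi : i < bs.length - 1 := hmem i (by simp)
    have hlen : (delC bs i).length = bs.length - 2 := length_delC bs i hi
    simp only [List.foldl_cons, List.map_cons, List.sum_cons]
    rw [sadStep]
    by_cases hcond : PySem.List.pyGet? bs (i : Int) = PySem.List.pyGet? bs ((i : Int) + 1)
    · rw [if_pos hcond]
      rw [cond_cast] at hcond
      simp only [slice_cast]
      -- the updated cache c2 and the value looked up
      by_cases hcon : c.contains (delC bs i) = true
      · -- cache hit
        have hsome : (c.get? (delC bs i)).isSome := by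
          rw [← PySem.Dict.contains_eq_isSome_get?]; exact hcon
        obtain ⟨v, hv⟩ := Option.isSome_iff_exists.mp hsome
        have hval : v = pureC (delC bs i) := hc _ _ hv
        have hgd : c.getD (delC bs i) 0 = pureC (delC bs i) := by
          rw [PySem.Dict.getD, hv, Option.getD_some, hval]
        simp only [hcon, if_true]
        obtain ⟨h1, h2⟩ := ih (fun j hj => hmem j (by simp [hj])) (p + c.getD (delC bs i) 0) c hc
        refine ⟨?_, h2⟩
        rw [h1, hgd, if_pos hcond]; ring
      · -- cache miss: recursive call
        have hnlt : (delC bs i).length < fuel := by omega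
        obtain ⟨hr1, hr2⟩ := IH (delC bs i) c hnlt hc
        simp only [eq_false_of_ne_true hcon, Bool.false_eq_true, if_false]
        set r := sadGo fuel (delC bs i) c with hr
        have hOK2 : CacheOK (r.2.insert (delC bs i) r.1) := by
          intro k w hw
          rw [PySem.Dict.get?_insert] at hw
          by_cases hk : k = delC bs i
          · rw [if_pos hk] at hw
            cases hw; rw [hk, hr1]
          · rw [if_neg hk] at hw; exact hr2 k w hw
        have hgd : (r.2.insert (delC bs i) r.1).getD (delC bs i) 0 = pureC (delC bs i) := by
          rw [PySem.Dict.getD_insert_self, hr1]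
        obtain ⟨h1, h2⟩ := ih (fun j hj => hmem j (by simp [hj]))
          (p + (r.2.insert (delC bs i) r.1).getD (delC bs i) 0)
          (r.2.insert (delC bs i) r.1) hOK2
        refine ⟨?_, h2⟩
        rw [h1, hgd, if_pos hcond]; ring
    · rw [if_neg hcond]
      rw [cond_cast] at hcond
      obtain ⟨h1, h2⟩ := ih (fun j hj => hmem j (by simp [hj])) p c hc
      refine ⟨?_, h2⟩
      rw [h1, if_neg hcond]; ring

lemma sadGo_spec : ∀ (fuel : Nat) (bs : List Char) (c : PySem.Dict (List Char) Int),
    bs.length < fuel → CacheOK c →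
    (sadGo fuel bs c).1 = pureC bs ∧ CacheOK (sadGo fuel bs c).2 := by
  intro fuel
  induction fuel with
  | zero => intro bs c h; omega
  | succ fuel ih =>
    intro bs c hlt hc
    by_cases h0 : bs.length = 0
    · have : bs = [] := List.length_eq_zero_iff.mp h0
      subst this
      rw [sadGo]; simp [pureC_nil, hc]
    · rw [sadGo_succ fuel bs c h0]
      obtain ⟨h1, h2⟩ := foldA fuel ih bs (by omega) (List.range (bs.length - 1))
        (fun i hi => List.mem_range.mp hi) 0 c hc
      refine ⟨?_, h2⟩
      rw [h1, pureC_eq bs (by intro h; simp [h] at h0)]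
      ring

lemma count_eq_pure (s : String) : count s = pureC s.toList := by
  have := sadGo_spec (s.toList.length + 1) s.toList PySem.Dict.empty (by omega)
    (by intro k v hv; rw [PySem.Dict.get?_empty] at hv; cases hv)
  exact this.1

-- ---------- B's side: weight invariant ----------
def wt (d : PySem.Dict (List Char) Int) : Int :=
  (d.items.map (fun p => p.2 * pureC p.1)).sum

def AllLen (d : PySem.Dict (List Char) Int) (L : Nat) : Prop :=
  ∀ p ∈ d.items, p.1.length = L

lemma map_overwrite_id (u : List Char) (v : Int) (l : List (List Char × Int))
    (h : ∀ q ∈ l, q.1 ≠ u) :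
    l.map (fun p => if p.1 == u then (u, v) else p) = l := by
  induction l with
  | nil => rfl
  | cons q l ih =>
    simp only [List.map_cons]
    rw [if_neg (by simp [h q (by simp)]), ih (fun q hq => h q (by simp [hq]))]

lemma sum_overwrite (l : List (List Char × Int)) (u : List Char) (old newv : Int)
    (hnd : (l.map Prod.fst).Nodup) (hmem : (u, old) ∈ l) :
    ((l.map (fun p => if p.1 == u then (u, newv) else p)).map (fun p => p.2 * pureC p.1)).sum
      = (l.map (fun p => p.2 * pureC p.1)).sum + (newv - old) * pureC u := by
  induction l with
  | nil => cases hmem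
  | cons q l ih =>
    simp only [List.map_cons, List.nodup_cons, List.mem_map] at hnd
    rcases List.mem_cons.mp hmem with h | h
    · -- head is the overwritten entry
      have hq1 : q.1 = u := by rw [← h]
      rw [List.map_cons, if_pos (by simp [hq1])]
      have hrest : l.map (fun p => if p.1 == u then (u, newv) else p) = l := by
        apply map_overwrite_id
        intro q' hq' he
        exact hnd.1 ⟨q', hq', by rw [he, ← hq1]⟩
      rw [hrest]
      simp only [List.map_cons, List.sum_cons]
      have hq2 : q.2 = old := by rw [← h]
      rw [hq1, hq2]; ring
    · -- overwritten entry is in the tail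
      have hu : u ∈ l.map Prod.fst := List.mem_map.mpr ⟨(u, old), h, rfl⟩
      have hq1 : q.1 ≠ u := by
        intro he; exact hnd.1 ⟨(u, old), h, by rw [he]⟩
      rw [List.map_cons, if_neg (by simp [hq1])]
      simp only [List.map_cons, List.sum_cons]
      rw [ih hnd.2 h]; ring

lemma wt_insert (d : PySem.Dict (List Char) Int) (hnd : d.keys.Nodup)
    (u : List Char) (c : Int) :
    wt (d.insert u (d.getD u 0 + c)) = wt d + c * pureC u := by
  by_cases hcon : d.contains u = true
  · have hsome : (d.get? u).isSome := by rw [← PySem.Dict.contains_eq_isSome_get?]; exact hcon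
    obtain ⟨v, hv⟩ := Option.isSome_iff_exists.mp hsome
    have hgd : d.getD u 0 = v := by rw [PySem.Dict.getD, hv, Option.getD_some]
    have hmem : (u, v) ∈ d.items := PySem.Dict.mem_items_of_get?_eq_some d hv
    rw [wt, PySem.Dict.items_insert_of_contains d _ hcon]
    have := sum_overwrite d.items u v (d.getD u 0 + c)
      (by simpa [PySem.Dict.keys] using hnd) hmem
    rw [this, hgd, wt]; ring
  · rw [wt, PySem.Dict.items_insert_of_not_contains d _ (by simpa using hcon)]
    have hnone : d.get? u = none := by
      cases h : d.get? u with
      | none => rfl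
      | some v => rw [PySem.Dict.contains_eq_isSome_get?, h] at hcon; simp at hcon
    have hgd : d.getD u 0 = 0 := by rw [PySem.Dict.getD, hnone, Option.getD_none]
    simp only [List.map_append, List.sum_append, List.map_cons, List.map_nil,
      List.sum_cons, List.sum_nil]
    rw [hgd, wt]; ring

-- the inner fold body of stepB, named for the proofs (definitionally the port's lambda)
def bInner (t : List Char) (c : Int) (nxt : PySem.Dict (List Char) Int) (i : Nat) :
    PySem.Dict (List Char) Int :=
  if PySem.List.pyGet? t (i : Int) = PySem.List.pyGet? t ((i : Int) + 1) then
    let u := PySem.List.slice t none (some (i : Int)) ++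
             PySem.List.slice t (some ((i : Int) + 2)) none
    nxt.insert u (nxt.getD u 0 + c)
  else nxt

lemma stepB_def (cur : PySem.Dict (List Char) Int) :
    stepB cur = cur.items.foldl
      (fun nxt tc => (List.range (tc.1.length - 1)).foldl (bInner tc.1 tc.2) nxt)
      PySem.Dict.empty := rfl

lemma foldB_inner (t : List Char) (c : Int) (M : Nat) (hM : t.length = M + 2) :
    ∀ (is : List Nat), (∀ i ∈ is, i < t.length - 1) →
    ∀ nxt, nxt.keys.Nodup → AllLen nxt M →
      wt (is.foldl (bInner t c) nxt) =
        wt nxt + c * (is.map (fun i => if t[i]? = t[i+1]? then pureC (delC t i) else 0)).sum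
      ∧ (is.foldl (bInner t c) nxt).keys.Nodup
      ∧ AllLen (is.foldl (bInner t c) nxt) M := by
  intro is
  induction is with
  | nil => intro _ nxt h1 h2; simp [h1, h2]
  | cons i is ih =>
    intro hmem nxt hnd hAll
    have hi : i < t.length - 1 := hmem i (by simp)
    have hlen : (delC t i).length = M := by rw [length_delC t i hi]; omega
    simp only [List.foldl_cons, List.map_cons, List.sum_cons]
    rw [bInner]
    by_cases hcond : PySem.List.pyGet? t (i : Int) = PySem.List.pyGet? t ((i : Int) + 1)
    · rw [if_pos hcond]
      rw [cond_cast] at hcond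
      simp only [slice_cast]
      have hnd' := PySem.Dict.nodup_keys_insert nxt (delC t i) (nxt.getD (delC t i) 0 + c) hnd
      have hAll' : AllLen (nxt.insert (delC t i) (nxt.getD (delC t i) 0 + c)) M := by
        intro p hp
        rcases (PySem.Dict.mem_items_insert nxt _ _ p).mp hp with h | h
        · rw [h]; exact hlen
        · exact hAll p h.1
      obtain ⟨h1, h2, h3⟩ := ih (fun j hj => hmem j (by simp [hj])) _ hnd' hAll'
      refine ⟨?_, h2, h3⟩
      rw [h1, wt_insert nxt hnd, if_pos hcond]; ring
    · rw [if_neg hcond]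
      rw [cond_cast] at hcond
      obtain ⟨h1, h2, h3⟩ := ih (fun j hj => hmem j (by simp [hj])) nxt hnd hAll
      refine ⟨?_, h2, h3⟩
      rw [h1, if_neg hcond]; ring

lemma stepB_spec (cur : PySem.Dict (List Char) Int) (L : Nat) (hL : 2 ≤ L)
    (hAll : AllLen cur L) :
    wt (stepB cur) = wt cur ∧ (stepB cur).keys.Nodup ∧ AllLen (stepB cur) (L - 2) := by
  have hie : (PySem.Dict.empty : PySem.Dict (List Char) Int).items = [] := rfl
  -- generalize over the items list being folded
  have main : ∀ (l : List (List Char × Int)), (∀ p ∈ l, p.1.length = L) →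
      ∀ nxt, nxt.keys.Nodup → AllLen nxt (L - 2) →
      wt (l.foldl (fun nxt tc => (List.range (tc.1.length - 1)).foldl (bInner tc.1 tc.2) nxt) nxt)
        = wt nxt + (l.map (fun p => p.2 * pureC p.1)).sum
      ∧ (l.foldl (fun nxt tc => (List.range (tc.1.length - 1)).foldl (bInner tc.1 tc.2) nxt) nxt).keys.Nodup
      ∧ AllLen (l.foldl (fun nxt tc => (List.range (tc.1.length - 1)).foldl (bInner tc.1 tc.2) nxt) nxt) (L - 2) := by
    intro l
    induction l with
    | nil => intro _ nxt h1 h2; simpa using ⟨h1, h2⟩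
    | cons tc l ih =>
      intro hl nxt hnd hAll'
      have ht : tc.1.length = L := hl tc (by simp)
      have hM : tc.1.length = (L - 2) + 2 := by omega
      simp only [List.foldl_cons, List.map_cons, List.sum_cons]
      obtain ⟨h1, h2, h3⟩ := foldB_inner tc.1 tc.2 (L - 2) hM
        (List.range (tc.1.length - 1)) (fun i hi => List.mem_range.mp hi) nxt hnd hAll'
      obtain ⟨g1, g2, g3⟩ := ih (fun p hp => hl p (by simp [hp])) _ h2 h3
      refine ⟨?_, g2, g3⟩
      rw [g1, h1, ← pureC_eq tc.1 (by intro h; rw [h] at ht; simp at ht; omega)]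
      ring
  obtain ⟨h1, h2, h3⟩ := main cur.items (fun p hp => hAll p hp) PySem.Dict.empty
    PySem.Dict.nodup_keys_empty (by intro p hp; rw [hie] at hp; cases hp)
  refine ⟨?_, by rw [stepB_def]; exact h2, by rw [stepB_def]; exact h3⟩
  rw [stepB_def, h1, wt, wt, hie]
  simp

lemma iterB (n : Nat) : ∀ (j : Nat), j ≤ n / 2 →
    ∀ d, d.keys.Nodup → AllLen d n →
    wt ((List.range j).foldl (fun c _ => stepB c) d) = wt d
    ∧ ((List.range j).foldl (fun c _ => stepB c) d).keys.Nodup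
    ∧ AllLen ((List.range j).foldl (fun c _ => stepB c) d) (n - 2*j) := by
  intro j
  induction j with
  | zero => intro _ d h1 h2; simpa using ⟨h1, h2⟩
  | succ j ih =>
    intro hj d hnd hAll
    obtain ⟨h1, h2, h3⟩ := ih (by omega) d hnd hAll
    rw [List.range_succ, List.foldl_append]
    simp only [List.foldl_cons, List.foldl_nil]
    have hL : 2 ≤ n - 2*j := by omega
    obtain ⟨g1, g2, g3⟩ := stepB_spec _ (n - 2*j) hL h3
    refine ⟨by rw [g1, h1], g2, ?_⟩
    have : n - 2*j - 2 = n - 2*(j+1) := by omega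
    rw [← this]; exact g3

lemma final_even (d : PySem.Dict (List Char) Int) (hnd : d.keys.Nodup)
    (hAll : AllLen d 0) : d.getD [] 0 = wt d := by
  by_cases hmem : ([] : List Char) ∈ d.keys
  · simp only [PySem.Dict.keys, List.mem_map] at hmem
    obtain ⟨p, hp, hp1⟩ := hmem
    have hget : d.get? [] = some p.2 := by
      apply PySem.Dict.get?_of_mem_items
      · rw [← hp1]; exact hp
      · exact hnd
    have hgd : d.getD [] 0 = p.2 := by rw [PySem.Dict.getD, hget, Option.getD_some]
    -- all items have key [], and keys are nodup, so items = [p]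
    have hitems : d.items = [p] := by
      cases h : d.items with
      | nil => rw [h] at hp; cases hp
      | cons q l =>
        cases hl : l with
        | nil =>
          subst hl
          have hpq : p = q := by rw [h] at hp; simpa using hp
          rw [hpq]
        | cons q2 l2 =>
          exfalso
          have hq : q.1 = [] := List.length_eq_zero_iff.mp (hAll q (by rw [h]; simp))
          have hq2 : q2.1 = [] := List.length_eq_zero_iff.mp
            (hAll q2 (by rw [h, hl]; simp))
          have := hnd
          rw [PySem.Dict.keys, h, hl] at this
          simp only [List.map_cons, List.nodup_cons, List.mem_cons] at this
          exact this.1 (Or.inl (by rw [hq, hq2]))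
    rw [hgd, wt, hitems]
    have hp1' : p.1 = [] := hp1
    simp [hp1', pureC_nil]
  · have hnone : d.get? [] = none := (PySem.Dict.get?_eq_none_iff_not_mem_keys d []).mpr hmem
    have hempty : d.items = [] := by
      cases h : d.items with
      | nil => rfl
      | cons q l =>
        exfalso
        have hq : q.1 = [] := List.length_eq_zero_iff.mp (hAll q (by rw [h]; simp))
        apply hmem
        rw [← hq]
        exact PySem.Dict.mem_keys_of_mem_items d (by rw [h]; simp)
    rw [PySem.Dict.getD, hnone, Option.getD_none, wt, hempty]
    simp

lemma final_odd (d : PySem.Dict (List Char) Int) (hAll : AllLen d 1) :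
    d.getD [] 0 = 0 ∧ wt d = 0 := by
  constructor
  · have hmem : ([] : List Char) ∉ d.keys := by
      intro h
      simp only [PySem.Dict.keys, List.mem_map] at h
      obtain ⟨p, hp, hp1⟩ := h
      have := hAll p hp
      rw [hp1] at this; simp at this
    rw [PySem.Dict.getD, (PySem.Dict.get?_eq_none_iff_not_mem_keys d []).mpr hmem,
      Option.getD_none]
  · rw [wt]
    have : ∀ p ∈ d.items, p.2 * pureC p.1 = 0 := by
      intro p hp
      rw [pureC_len_one p.1 (hAll p hp)]; ring
    rw [List.sum_eq_zero]
    intro x hx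
    obtain ⟨p, hp, hpx⟩ := List.mem_map.mp hx
    rw [← hpx]; exact this p hp

lemma count_alt_eq_pure (s : String) : count_alt s = pureC s.toList := by
  rw [count_alt]
  set l := s.toList with hl
  have hnd0 : (PySem.Dict.empty.insert l (1 : Int)).keys.Nodup :=
    PySem.Dict.nodup_keys_insert _ _ _ PySem.Dict.nodup_keys_empty
  have hitems0 : (PySem.Dict.empty.insert l (1 : Int)).items = [(l, 1)] := by
    rw [PySem.Dict.items_insert_of_not_contains _ _ (PySem.Dict.contains_empty l),
      (rfl : (PySem.Dict.empty : PySem.Dict (List Char) Int).items = [])]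
    rfl
  have hAll0 : AllLen (PySem.Dict.empty.insert l (1 : Int)) l.length := by
    intro p hp; rw [hitems0] at hp; simp at hp; simp [hp]
  have hwt0 : wt (PySem.Dict.empty.insert l (1 : Int)) = pureC l := by
    rw [wt, hitems0]; simp
  obtain ⟨h1, h2, h3⟩ := iterB l.length (l.length / 2) (le_refl _) _ hnd0 hAll0
  have hrem : l.length - 2 * (l.length / 2) = l.length % 2 := by omega
  rw [hrem] at h3
  rcases Nat.mod_two_eq_zero_or_one l.length with h | h
  · rw [h] at h3
    rw [final_even _ h2 h3, h1, hwt0]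
  · rw [h] at h3
    obtain ⟨g1, g2⟩ := final_odd _ h3
    rw [g1, ← hwt0, ← h1, g2]

-- ===== VERDICT (by name: the statement is the Claim_ definition above) =====
theorem count_spec : Claim_equal_count := by
  intro s _
  unfold Spec_count
  rw [count_eq_pure, count_alt_eq_pure]
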